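-- pv_equiv track=rewrite | github.com/chen910/cs579 | a4/classify.py | rateTweet
-- ===== SOURCE A (Python) =====
-- def afinnSentiment(afinn, feats):
--     '''compute afinn score for each tokens
--     return:
--         score ... afinn sentiment score of token
--     '''
--     score = 0
--     for f in feats:
--         if f in afinn:
--             score += afinn[f]
--     return score
--
-- def rateTweet(tokens, tweets,afinn):
--     '''rate tweets sentiment use afinn sentiment analyze
--     return:
--         positive ... a list with positive score (tweet, score) tuple
--         neutral .... a list with neutral score (tweet, score) tuple
--         negative ... a list with negative score (tweet, score) tuple
--     '''
--     positive = []
--     neutral = []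
--     negative = []
--     for token, tweet in zip(tokens,tweets):
--         score = afinnSentiment(afinn, token)
--         if score > 0:
--             positive.append((tweet['text'], score))
--         elif score == 0 :
--             neutral.append((tweet['text'], score))
--         else:
--             negative.append((tweet['text'], score))
--     return positive, neutral, negative
-- ===== SOURCE B (Python) =====
-- def rateTweet(tokens, tweets, afinn):
--     scored = [(tweet['text'], sum(afinn[f] for f in token if f in afinn))
--               for token, tweet in zip(tokens, tweets)]
--     positive = [p for p in scored if p[1] > 0]
--     neutral = [p for p in scored if p[1] == 0]
--     negative = [p for p in scored if p[1] < 0]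
--     return positive, neutral, negative
-- ===== Notes on version B (the rewrite author's own statement) =====
-- stated objective: simpler
-- what changed: A classifies in one branching loop with three growing accumulators; B first builds one scored list (text, score) with an inlined sum-comprehension score, then partitions it with three separate filter passes.
import Mathlib
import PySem

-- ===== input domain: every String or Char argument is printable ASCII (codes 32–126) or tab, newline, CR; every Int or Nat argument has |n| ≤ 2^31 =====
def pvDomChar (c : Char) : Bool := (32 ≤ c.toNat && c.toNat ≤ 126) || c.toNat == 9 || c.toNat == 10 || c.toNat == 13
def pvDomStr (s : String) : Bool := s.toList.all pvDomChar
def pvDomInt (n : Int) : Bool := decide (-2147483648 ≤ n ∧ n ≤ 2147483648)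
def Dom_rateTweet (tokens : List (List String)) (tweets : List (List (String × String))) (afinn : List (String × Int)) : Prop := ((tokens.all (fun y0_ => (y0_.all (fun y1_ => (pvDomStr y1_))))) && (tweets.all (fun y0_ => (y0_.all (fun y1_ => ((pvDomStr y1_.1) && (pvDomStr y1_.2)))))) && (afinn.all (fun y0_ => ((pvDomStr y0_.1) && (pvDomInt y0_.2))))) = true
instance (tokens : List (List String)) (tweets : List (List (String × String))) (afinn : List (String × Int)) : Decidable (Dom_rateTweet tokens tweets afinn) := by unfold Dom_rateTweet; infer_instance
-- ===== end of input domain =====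

-- B builds one scored list and partitions it with three filter passes instead of A's single
-- branching loop over three accumulators (objective: simpler).


-- dict lookup (first match) on an association list; exact for Python dict membership/indexing
def pvLookup? {ν : Type} (d : List (String × ν)) (k : String) : Option ν :=
  (d.find? (fun kv => kv.1 == k)).map (·.2)

-- ===== PORT A =====
-- literal port of afinnSentiment: score = 0; for f in feats: if f in afinn: score += afinn[f]
def afinnSentiment (afinn : List (String × Int)) (feats : List String) : Int :=
  feats.foldl (fun score f =>
    match pvLookup? afinn f with
    | some v => score + v
    | none => score) 0

-- tweet['text'] raises KeyError when absent; Pre_ excludes that, .getD "" is never reached inside Pre_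
def rateTweet (tokens : List (List String)) (tweets : List (List (String × String))) (afinn : List (String × Int)) : (List (String × Int)) × (List (String × Int)) × (List (String × Int)) :=
  (tokens.zip tweets).foldl
    (fun acc p =>
      let score := afinnSentiment afinn p.1
      if score > 0 then (acc.1 ++ [((pvLookup? p.2 "text").getD "", score)], acc.2.1, acc.2.2)
      else if score = 0 then (acc.1, acc.2.1 ++ [((pvLookup? p.2 "text").getD "", score)], acc.2.2)
      else (acc.1, acc.2.1, acc.2.2 ++ [((pvLookup? p.2 "text").getD "", score)]))
    ([], [], [])

-- ===== PORT B =====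
-- inlined score: sum(afinn[f] for f in token if f in afinn)
def scoreB (afinn : List (String × Int)) (tok : List String) : Int :=
  ((tok.filter (fun f => (pvLookup? afinn f).isSome)).map (fun f => (pvLookup? afinn f).getD 0)).sum

def rateTweet_alt (tokens : List (List String)) (tweets : List (List (String × String))) (afinn : List (String × Int)) : (List (String × Int)) × (List (String × Int)) × (List (String × Int)) :=
  let scored := (tokens.zip tweets).map (fun p => ((pvLookup? p.2 "text").getD "", scoreB afinn p.1))
  (scored.filter (fun q => decide (q.2 > 0)),
   scored.filter (fun q => decide (q.2 = 0)),
   scored.filter (fun q => decide (q.2 < 0)))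

-- ===== PRECONDITION & SPEC =====
-- Pre_ excludes exactly the inputs where Python A (and B) raise KeyError: a zipped tweet without a 'text' key.
def Pre_rateTweet (tokens : List (List String)) (tweets : List (List (String × String))) (afinn : List (String × Int)) : Prop :=
  ∀ p ∈ tokens.zip tweets, (pvLookup? p.2 "text").isSome = true
instance (tokens : List (List String)) (tweets : List (List (String × String))) (afinn : List (String × Int)) : Decidable (Pre_rateTweet tokens tweets afinn) := by unfold Pre_rateTweet; infer_instance

def pvWitness_rateTweet : List (List String) × (List (List (String × String))) × (List (String × Int)) :=
  ([["good"], ["bad"], ["meh"]],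
   ([[("text", "t1")], [("text", "t2")], [("text", "t3")]],
    [("good", 3), ("bad", -2)]))

def Spec_rateTweet (tokens : List (List String)) (tweets : List (List (String × String))) (afinn : List (String × Int)) (out : (List (String × Int)) × (List (String × Int)) × (List (String × Int))) : Prop := out = rateTweet_alt tokens tweets afinn
instance (tokens : List (List String)) (tweets : List (List (String × String))) (afinn : List (String × Int)) (out : (List (String × Int)) × (List (String × Int)) × (List (String × Int))) : Decidable (Spec_rateTweet tokens tweets afinn out) := by unfold Spec_rateTweet; infer_instance

-- ===== CLAIM (what is proved, stated in full; the proofs are below) =====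
def Claim_equal_rateTweet : Prop := ∀ (tokens : List (List String)) (tweets : List (List (String × String))) (afinn : List (String × Int)), Dom_rateTweet tokens tweets afinn → Pre_rateTweet tokens tweets afinn → Spec_rateTweet tokens tweets afinn (rateTweet tokens tweets afinn)

-- ===== LEMMAS AND PROOFS =====

-- A's running sum equals B's sum-of-filtered-map, for any start value
theorem score_foldl_eq (afinn : List (String × Int)) (tok : List String) (s : Int) :
    tok.foldl (fun score f =>
      match pvLookup? afinn f with
      | some v => score + v
      | none => score) s = s + scoreB afinn tok := by
  induction tok generalizing s with
  | nil => simp [scoreB]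
  | cons f rest ih =>
    simp only [List.foldl_cons]
    cases h : pvLookup? afinn f with
    | none => simp [ih, scoreB, h]
    | some v => simp [ih, scoreB, h]; ring

theorem afinnSentiment_eq (afinn : List (String × Int)) (tok : List String) :
    afinnSentiment afinn tok = scoreB afinn tok := by
  simpa using score_foldl_eq afinn tok 0

-- A's classifying fold, from any accumulators, appends exactly B's three filters of the scored map
theorem loop_partition (afinn : List (String × Int))
    (l : List ((List String) × List (String × String)))
    (p n g : List (String × Int)) :
    l.foldl
      (fun acc q =>
        let score := afinnSentiment afinn q.1
        if score > 0 then (acc.1 ++ [((pvLookup? q.2 "text").getD "", score)], acc.2.1, acc.2.2)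
        else if score = 0 then (acc.1, acc.2.1 ++ [((pvLookup? q.2 "text").getD "", score)], acc.2.2)
        else (acc.1, acc.2.1, acc.2.2 ++ [((pvLookup? q.2 "text").getD "", score)]))
      (p, n, g)
    = (p ++ (l.map (fun q => ((pvLookup? q.2 "text").getD "", scoreB afinn q.1))).filter (fun q => decide (q.2 > 0)),
       n ++ (l.map (fun q => ((pvLookup? q.2 "text").getD "", scoreB afinn q.1))).filter (fun q => decide (q.2 = 0)),
       g ++ (l.map (fun q => ((pvLookup? q.2 "text").getD "", scoreB afinn q.1))).filter (fun q => decide (q.2 < 0))) := by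
  induction l generalizing p n g with
  | nil => simp
  | cons q rest ih =>
    simp only [List.foldl_cons, List.map_cons, List.filter_cons]
    rw [afinnSentiment_eq]
    rcases lt_trichotomy (scoreB afinn q.1) 0 with h | h | h
    · have h1 : ¬ (scoreB afinn q.1 > 0) := by omega
      have h2 : ¬ (scoreB afinn q.1 = 0) := by omega
      simp only [if_neg h1, if_neg h2, ih]
      simp [h, h1, h2]
    · simp only [h]
      simp only [if_neg (by omega : ¬ ((0 : Int) > 0)), ih]
      simp
    · simp only [if_pos h, ih]
      have h2 : ¬ (scoreB afinn q.1 = 0) := by omega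
      have h3 : ¬ (scoreB afinn q.1 < 0) := by omega
      simp [h, h2, h3]

-- ===== VERDICT (by name: the statement is the Claim_ definition above) =====
theorem rateTweet_spec : Claim_equal_rateTweet := by
  intro tokens tweets afinn _ _
  unfold Spec_rateTweet rateTweet rateTweet_alt
  simpa using loop_partition afinn (tokens.zip tweets) [] [] []
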